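-- pv_equiv track=rewrite | github.com/xiaoxiaofengzi/ACP_Test | src/placement.py | Area_btw_Path_Num
-- ===== SOURCE A (Python) =====
-- def Area_btw_Path_Num(Node_list1,Node_list2,All_Path_list):    #TODO 域间节点链路判断得出域间链路个数
--     """
--     :param Node_list1: 域1内节点序列
--     :param Node_list2: 域2内节点序列
--     :param All_Path_list: 所有链路序列
--     :return: 域间Edge个数
--     """
--     Path_Num_btw = 0
--     for i in Node_list1:
--         for j in Node_list2:
--             if (i, j) in All_Path_list:
--                 Path_Num_btw += 1
--             else:
--                 Path_Num_btw += 0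
--     return Path_Num_btw
-- ===== SOURCE B (Python) =====
-- def Area_btw_Path_Num(Node_list1, Node_list2, All_Path_list):
--     cnt1 = {}
--     for a in Node_list1:
--         cnt1[a] = cnt1.get(a, 0) + 1
--     cnt2 = {}
--     for b in Node_list2:
--         cnt2[b] = cnt2.get(b, 0) + 1
--     total = 0
--     for (a, b) in set(All_Path_list):
--         total += cnt1.get(a, 0) * cnt2.get(b, 0)
--     return total
-- ===== Notes on version B (the rewrite author's own statement) =====
-- stated objective: faster
-- what changed: Instead of testing membership of every (i,j) node pair in the path list, B builds frequency tables of the two node lists once and sums cnt1[a]*cnt2[b] over the distinct edges.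
import Mathlib
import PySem

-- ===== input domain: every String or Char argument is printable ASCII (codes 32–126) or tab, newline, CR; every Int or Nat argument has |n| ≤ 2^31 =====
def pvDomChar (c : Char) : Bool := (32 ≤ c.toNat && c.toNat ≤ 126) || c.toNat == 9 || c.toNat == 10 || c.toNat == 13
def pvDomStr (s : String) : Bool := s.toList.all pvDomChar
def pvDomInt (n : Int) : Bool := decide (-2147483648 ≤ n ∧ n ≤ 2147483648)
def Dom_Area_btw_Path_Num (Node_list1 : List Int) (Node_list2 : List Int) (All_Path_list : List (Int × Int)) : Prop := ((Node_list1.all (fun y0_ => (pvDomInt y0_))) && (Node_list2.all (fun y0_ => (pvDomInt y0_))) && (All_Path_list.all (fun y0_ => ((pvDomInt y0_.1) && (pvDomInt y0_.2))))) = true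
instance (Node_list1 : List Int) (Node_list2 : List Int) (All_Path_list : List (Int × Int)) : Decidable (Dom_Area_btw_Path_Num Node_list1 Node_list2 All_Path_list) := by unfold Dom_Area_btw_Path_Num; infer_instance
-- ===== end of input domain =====

-- B replaces the all-pairs membership scan by frequency tables of the node lists
-- summed over the distinct edges (faster: one pass per input instead of a triple scan).

-- ===== PORT A =====
def Area_btw_Path_Num (Node_list1 : List Int) (Node_list2 : List Int) (All_Path_list : List (Int × Int)) : Int :=
  Node_list1.foldl (fun acc i =>
    Node_list2.foldl (fun acc2 j =>
      if (i, j) ∈ All_Path_list then acc2 + 1 else acc2) acc) 0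

-- ===== PORT B =====
def Area_btw_Path_Num_alt (Node_list1 : List Int) (Node_list2 : List Int) (All_Path_list : List (Int × Int)) : Int :=
  let cnt1 := Node_list1.foldl (fun d x => d.insert x (d.getD x 0 + 1)) (PySem.Dict.empty : PySem.Dict Int Int)
  let cnt2 := Node_list2.foldl (fun d x => d.insert x (d.getD x 0 + 1)) (PySem.Dict.empty : PySem.Dict Int Int)
  (PySem.Set.ofList All_Path_list).foldl (fun acc e =>
    acc + cnt1.getD e.1 0 * cnt2.getD e.2 0) 0

-- ===== PRECONDITION & SPEC =====
def Spec_Area_btw_Path_Num (Node_list1 : List Int) (Node_list2 : List Int) (All_Path_list : List (Int × Int)) (out : Int) : Prop := out = Area_btw_Path_Num_alt Node_list1 Node_list2 All_Path_list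
instance (Node_list1 : List Int) (Node_list2 : List Int) (All_Path_list : List (Int × Int)) (out : Int) : Decidable (Spec_Area_btw_Path_Num Node_list1 Node_list2 All_Path_list out) := by unfold Spec_Area_btw_Path_Num; infer_instance

-- ===== CLAIM (what is proved, stated in full; the proofs are below) =====
def Claim_equal_Area_btw_Path_Num : Prop := ∀ (Node_list1 : List Int) (Node_list2 : List Int) (All_Path_list : List (Int × Int)), Dom_Area_btw_Path_Num Node_list1 Node_list2 All_Path_list → Spec_Area_btw_Path_Num Node_list1 Node_list2 All_Path_list (Area_btw_Path_Num Node_list1 Node_list2 All_Path_list)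

-- ===== LEMMAS AND PROOFS =====

theorem pvSumMapAdd (E : List (Int × Int)) (f g : Int × Int → Int) :
    (E.map (fun e => f e + g e)).sum = (E.map f).sum + (E.map g).sum := by
  induction E with
  | nil => simp
  | cons e t ih => simp [ih]; ring

theorem pvSumIndicator (E : List (Int × Int)) (x : Int × Int) (hnd : E.Nodup) :
    (E.map (fun e => if e = x then (1 : Int) else 0)).sum = if x ∈ E then 1 else 0 := by
  induction E with
  | nil => simp
  | cons e t ih =>
    rcases List.nodup_cons.mp hnd with ⟨hnotmem, hnd'⟩
    simp only [List.map_cons, List.sum_cons, ih hnd', List.mem_cons]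
    by_cases hex : e = x
    · subst hex
      simp [hnotmem]
    · simp [hex, Ne.symm hex]

theorem pvInner (E : List (Int × Int)) (P : List (Int × Int)) (a : Int) (l2 : List Int)
    (hnd : E.Nodup) (hmem : ∀ e, e ∈ E ↔ e ∈ P) :
    (E.map (fun e => (if e.1 = a then (1 : Int) else 0) * (l2.count e.2 : Int))).sum
      = (l2.countP (fun j => decide ((a, j) ∈ P)) : Int) := by
  induction l2 with
  | nil => simp
  | cons j t ih =>
    have hsplit : ∀ e : Int × Int,
        (if e.1 = a then (1 : Int) else 0) * (((j :: t).count e.2 : Nat) : Int)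
          = (if e.1 = a then (1 : Int) else 0) * (t.count e.2 : Int)
            + (if e = (a, j) then (1 : Int) else 0) := by
      intro e
      rcases e with ⟨e1, e2⟩
      simp only [List.count_cons, Prod.mk.injEq]
      push_cast
      by_cases h1 : e1 = a <;> by_cases h2 : j = e2
      · simp [h1, h2]
      · simp [h1, h2]; exact fun h => h2 h.symm
      · simp [h1]
      · simp [h1]
    calc (E.map (fun e => (if e.1 = a then (1 : Int) else 0) * ((j :: t).count e.2 : Int))).sum
        = (E.map (fun e => (if e.1 = a then (1 : Int) else 0) * (t.count e.2 : Int)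
            + (if e = (a, j) then (1 : Int) else 0))).sum := by
          exact congrArg List.sum (List.map_congr_left (fun e _ => hsplit e))
      _ = (E.map (fun e => (if e.1 = a then (1 : Int) else 0) * (t.count e.2 : Int))).sum
            + (E.map (fun e => if e = (a, j) then (1 : Int) else 0)).sum := pvSumMapAdd E _ _
      _ = (t.countP (fun j => decide ((a, j) ∈ P)) : Int) + (if (a, j) ∈ E then 1 else 0) := by
          rw [ih, pvSumIndicator E (a, j) hnd]
      _ = ((j :: t).countP (fun j => decide ((a, j) ∈ P)) : Int) := by
          rw [List.countP_cons]
          by_cases h : (a, j) ∈ P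
          · have hE : (a, j) ∈ E := (hmem _).mpr h
            simp [h, hE]
          · have hE : (a, j) ∉ E := fun hx => h ((hmem _).mp hx)
            simp [h, hE]

theorem pvMain (l1 l2 : List Int) (P : List (Int × Int)) (E : List (Int × Int))
    (hnd : E.Nodup) (hmem : ∀ e, e ∈ E ↔ e ∈ P) :
    (l1.map (fun i => (l2.countP (fun j => decide ((i, j) ∈ P)) : Int))).sum
      = (E.map (fun e => (l1.count e.1 : Int) * (l2.count e.2 : Int))).sum := by
  induction l1 with
  | nil => simp
  | cons a t ih =>
    have hsplit : ∀ e : Int × Int,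
        ((a :: t).count e.1 : Int) * (l2.count e.2 : Int)
          = (t.count e.1 : Int) * (l2.count e.2 : Int)
            + (if e.1 = a then (1 : Int) else 0) * (l2.count e.2 : Int) := by
      intro e
      rw [List.count_cons]
      push_cast
      by_cases h : a = e.1
      · simp [h]; ring
      · simp [h]; exact fun hx => absurd hx.symm h
    rw [show (E.map (fun e => ((a :: t).count e.1 : Int) * (l2.count e.2 : Int)))
        = E.map (fun e => (t.count e.1 : Int) * (l2.count e.2 : Int)
            + (if e.1 = a then (1 : Int) else 0) * (l2.count e.2 : Int)) from
      List.map_congr_left (fun e _ => hsplit e)]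
    rw [pvSumMapAdd, ← ih, pvInner E P a l2 hnd hmem]
    simp [add_comm]

-- ===== VERDICT (by name: the statement is the Claim_ definition above) =====
theorem Area_btw_Path_Num_spec : Claim_equal_Area_btw_Path_Num := by
  intro l1 l2 P _
  unfold Spec_Area_btw_Path_Num Area_btw_Path_Num Area_btw_Path_Num_alt
  have hA : l1.foldl (fun acc i => l2.foldl (fun acc2 j => if (i, j) ∈ P then acc2 + 1 else acc2) acc) 0
      = (l1.map (fun i => (l2.countP (fun j => decide ((i, j) ∈ P)) : Int))).sum := by
    have h1 : ∀ (acc : Int) (i : Int),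
        l2.foldl (fun acc2 j => if (i, j) ∈ P then acc2 + 1 else acc2) acc
          = acc + (l2.countP (fun j => decide ((i, j) ∈ P)) : Int) := by
      intro acc i
      exact PySem.List.foldl_ite_add_one (fun j => (i, j) ∈ P) l2 acc
    rw [PySem.List.foldl_congr_mem l1 _
      (fun acc i => acc + (l2.countP (fun j => decide ((i, j) ∈ P)) : Int)) 0
      (by intro acc x _; exact h1 acc x)]
    rw [PySem.List.foldl_add]
    simp
  rw [hA]
  have hB : ((PySem.Set.ofList P).foldl (fun acc e =>
      acc + (l1.foldl (fun d x => d.insert x (d.getD x 0 + 1)) (PySem.Dict.empty : PySem.Dict Int Int)).getD e.1 0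
          * (l2.foldl (fun d x => d.insert x (d.getD x 0 + 1)) (PySem.Dict.empty : PySem.Dict Int Int)).getD e.2 0) 0)
      = ((PySem.Set.ofList P).map (fun e => (l1.count e.1 : Int) * (l2.count e.2 : Int))).sum := by
    rw [PySem.List.foldl_congr_mem (PySem.Set.ofList P) _
      (fun acc e => acc + (l1.count e.1 : Int) * (l2.count e.2 : Int)) 0
      (by intro acc e _
          rw [PySem.Dict.getD_foldl_insert_add_one, PySem.Dict.getD_foldl_insert_add_one]
          simp [PySem.Dict.getD_empty])]
    rw [PySem.List.foldl_add]
    simp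
  simp only []
  rw [hB]
  exact pvMain l1 l2 P (PySem.Set.ofList P) (PySem.Set.nodup_ofList P)
    (fun e => PySem.Set.mem_ofList P e)
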